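-- pv_equiv track=rewrite | github.com/nokukuno16/GOA-courses | day 70/homework/main.py | create_sorted_2d_array
-- ===== SOURCE A (Python) =====
-- def create_sorted_2d_array(rows, cols):
--
--     array = [[0 for _ in range(cols)] for _ in range(rows)]
--
--
--     value = 1
--     for i in range(rows):
--         for j in range(cols):
--             if i == 0:
--                 array[i][j] = value
--             else:
--                 array[i][j] = array[i - 1][j] + 1
--             value += 1
--
--
--     for i in range(1, rows):
--         for j in range(1, cols):
--             array[i][j] = max(array[i][j], array[i][j - 1] + 1)
--
--     return array
-- ===== SOURCE B (Python) =====
-- def create_sorted_2d_array(rows, cols):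
--     return [[i + j + 1 for j in range(cols)] for i in range(rows)]
-- ===== Notes on version B (the rewrite author's own statement) =====
-- stated objective: simpler
-- what changed: Replaces the two-pass fill (base-row counter, vertical +1 recurrence, then a max-relaxation pass) with a single closed-form comprehension writing i+j+1 directly.
import Mathlib
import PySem

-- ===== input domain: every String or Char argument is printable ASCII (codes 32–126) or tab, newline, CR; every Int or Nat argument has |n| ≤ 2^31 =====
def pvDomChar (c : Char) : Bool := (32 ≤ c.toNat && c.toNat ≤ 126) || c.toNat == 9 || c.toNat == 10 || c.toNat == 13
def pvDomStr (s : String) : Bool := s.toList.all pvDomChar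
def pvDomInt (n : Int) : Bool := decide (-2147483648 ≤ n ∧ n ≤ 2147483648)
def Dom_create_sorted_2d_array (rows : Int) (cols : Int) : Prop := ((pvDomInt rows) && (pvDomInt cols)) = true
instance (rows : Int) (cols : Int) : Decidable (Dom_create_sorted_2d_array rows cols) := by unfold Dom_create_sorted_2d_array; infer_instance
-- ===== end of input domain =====

-- B replaces A's two-pass counter/recurrence/max-relaxation fill by the closed form i+j+1 (simpler, one pass).

-- ===== PORT A =====
-- Loop indices come from range(0,…) / range(1,…), so they are nonnegative and `.toNat` is exact;
-- in-range reads `array[i][j]` are ported with `List.getD`, writes with `List.set`.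
def create_sorted_2d_array (rows : Int) (cols : Int) : List (List Int) :=
  -- array = [[0 for _ in range(cols)] for _ in range(rows)]
  let array : List (List Int) :=
    (PySem.List.pyRange 0 rows 1).map (fun _ => (PySem.List.pyRange 0 cols 1).map (fun _ => (0 : Int)))
  -- first pass: counter `value`, row 0 from the counter, later rows = cell above + 1
  let st : List (List Int) × Int :=
    (PySem.List.pyRange 0 rows 1).foldl (fun st i =>
      (PySem.List.pyRange 0 cols 1).foldl (fun (st : List (List Int) × Int) j =>
        (st.1.set i.toNat ((st.1.getD i.toNat []).set j.toNat
            (if i = 0 then st.2 else (st.1.getD (i - 1).toNat []).getD j.toNat 0 + 1)),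
         st.2 + 1)) st) (array, 1)
  -- second pass: array[i][j] = max(array[i][j], array[i][j-1] + 1)
  (PySem.List.pyRange 1 rows 1).foldl (fun a i =>
    (PySem.List.pyRange 1 cols 1).foldl (fun a j =>
      a.set i.toNat ((a.getD i.toNat []).set j.toNat
        (max ((a.getD i.toNat []).getD j.toNat 0) ((a.getD i.toNat []).getD (j - 1).toNat 0 + 1)))) a) st.1

-- ===== PORT B =====
def create_sorted_2d_array_alt (rows : Int) (cols : Int) : List (List Int) :=
  (PySem.List.pyRange 0 rows 1).map (fun i => (PySem.List.pyRange 0 cols 1).map (fun j => i + j + 1))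

-- ===== PRECONDITION & SPEC =====
def Spec_create_sorted_2d_array (rows : Int) (cols : Int) (out : List (List Int)) : Prop := out = create_sorted_2d_array_alt rows cols
instance (rows : Int) (cols : Int) (out : List (List Int)) : Decidable (Spec_create_sorted_2d_array rows cols out) := by unfold Spec_create_sorted_2d_array; infer_instance

-- ===== CLAIM (what is proved, stated in full; the proofs are below) =====
def Claim_equal_create_sorted_2d_array : Prop := ∀ (rows : Int) (cols : Int), Dom_create_sorted_2d_array rows cols → Spec_create_sorted_2d_array rows cols (create_sorted_2d_array rows cols)

-- ===== LEMMAS AND PROOFS =====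

-- finished row i, partially finished row (first m cells), and the finished / in-progress whole array
def pvRowT (M i : Nat) : List Int := (List.range M).map (fun (j : Nat) => (i : Int) + (j : Int) + 1)
def pvRowP (M k m : Nat) : List Int := (List.range M).map (fun (j : Nat) => if j < m then (k : Int) + (j : Int) + 1 else 0)
def pvState (N M k m : Nat) : List (List Int) :=
  (List.range N).map (fun i => if i < k then pvRowT M i else if i = k then pvRowP M k m else (List.range M).map (fun _ => (0 : Int)))
def pvTargetT (N M : Nat) : List (List Int) := (List.range N).map (pvRowT M)

theorem pvSet_getD_self {α : Type} (r : List α) (n : Nat) (d : α) (h : n < r.length) :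
    r.set n (r.getD n d) = r := by
  rw [List.getD_eq_getElem r d h]
  exact List.set_getElem_self h

theorem pvFoldl_fix {α β : Type} (l : List α) (f : β → α → β) (b : β) (h : ∀ x ∈ l, f b x = b) :
    l.foldl f b = b := by
  induction l with
  | nil => rfl
  | cons x xs ih =>
    simp only [List.foldl_cons, h x (by simp)]
    exact ih (fun y hy => h y (by simp [hy]))

theorem pvRowT_getD (M i j : Nat) (hj : j < M) :
    (pvRowT M i).getD j 0 = (i : Int) + j + 1 := by
  simp only [pvRowT]
  rw [PySem.List.getD_map_range _ _ _ _ hj]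

theorem pvRowT_length (M i : Nat) : (pvRowT M i).length = M := by simp [pvRowT]

theorem pvRowP_set (M k m : Nat) :
    (pvRowP M k m).set m ((k : Int) + m + 1) = pvRowP M k (m + 1) := by
  apply List.ext_getElem (by simp [pvRowP])
  intro j h1 h2
  simp only [pvRowP, List.length_set, List.length_map, List.length_range] at h1 h2
  rw [List.getElem_set]
  by_cases h : m = j
  · subst h; simp [pvRowP]
  · simp only [pvRowP, List.getElem_map, List.getElem_range]
    by_cases hj : j < m
    · rw [if_neg h, if_pos hj, if_pos (by omega)]
    · rw [if_neg h, if_neg hj, if_neg (by omega)]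

theorem pvRowP_full (M k : Nat) : pvRowP M k M = pvRowT M k := by
  simp only [pvRowP, pvRowT]
  exact List.map_congr_left (fun j hj => if_pos (List.mem_range.mp hj))

theorem pvRowP_zero (M k : Nat) : pvRowP M k 0 = (List.range M).map (fun _ => (0 : Int)) := by
  simp only [pvRowP]
  exact List.map_congr_left (fun j _ => if_neg (by omega))

theorem pvState_getD (N M k m i : Nat) (hi : i < N) :
    (pvState N M k m).getD i []
      = if i < k then pvRowT M i else if i = k then pvRowP M k m else (List.range M).map (fun _ => (0 : Int)) := by
  simp only [pvState]
  rw [PySem.List.getD_map_range _ _ _ _ hi]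

theorem pvState_set (N M k m m' : Nat) :
    (pvState N M k m).set k (pvRowP M k m') = pvState N M k m' := by
  apply List.ext_getElem (by simp [pvState])
  intro i h1 h2
  simp only [pvState, List.length_set, List.length_map, List.length_range] at h1 h2
  rw [List.getElem_set]
  by_cases h : k = i
  · subst h; simp [pvState]
  · simp only [pvState, List.getElem_map, List.getElem_range]
    by_cases hik : i < k
    · rw [if_neg h, if_pos hik, if_pos hik]
    · rw [if_neg h, if_neg hik, if_neg hik, if_neg (by omega), if_neg (by omega)]

theorem pvState_roll (N M k : Nat) (hk : k < N) :
    pvState N M k M = pvState N M (k + 1) 0 := by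
  apply List.map_congr_left
  intro i hi
  by_cases h1 : i < k
  · rw [if_pos h1, if_pos (by omega)]
  · by_cases h2 : i = k
    · subst h2
      rw [if_neg h1, if_pos rfl, if_pos (by omega)]
      exact pvRowP_full M i
    · rw [if_neg h1, if_neg h2, if_neg (by omega)]
      by_cases h3 : i = k + 1
      · rw [if_pos h3]
        exact (pvRowP_zero M (k + 1)).symm
      · rw [if_neg h3]

theorem pvState_init (N M : Nat) :
    pvState N M 0 0 = (List.range N).map (fun _ => (List.range M).map (fun _ => (0 : Int))) := by
  apply List.map_congr_left
  intro i _
  by_cases h : i = 0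
  · subst h
    rw [if_neg (by omega), if_pos rfl]
    exact pvRowP_zero M 0
  · rw [if_neg (by omega), if_neg h]

theorem pvState_final (N M : Nat) : pvState N M N 0 = pvTargetT N M := by
  apply List.map_congr_left
  intro i hi
  rw [if_pos (List.mem_range.mp hi)]

-- the inner loop of the first pass, for row k, cell by cell
theorem pvInner (N M k : Nat) (hk : k < N) (v0 : Int) (hv : k = 0 → v0 = 1) (m : Nat) (hm : m ≤ M) :
    (List.range m).foldl
      (fun (st : List (List Int) × Int) (j : Nat) =>
        (st.1.set k ((st.1.getD k []).set j
            (if ((k : Nat) : Int) = 0 then st.2 else (st.1.getD (((k : Nat) : Int) - 1).toNat []).getD j 0 + 1)),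
         st.2 + 1))
      (pvState N M k 0, v0)
      = (pvState N M k m, v0 + m) := by
  induction m with
  | zero => simp
  | succ m ih =>
    have hm' : m ≤ M := Nat.le_of_succ_le hm
    rw [List.range_succ, List.foldl_append, ih hm', List.foldl_cons, List.foldl_nil]
    have hrow : (pvState N M k m).getD k [] = pvRowP M k m := by
      rw [pvState_getD N M k m k hk, if_neg (Nat.lt_irrefl k), if_pos rfl]
    have hval : (if ((k : Nat) : Int) = 0 then v0 + (m : Int)
        else ((pvState N M k m).getD (((k : Nat) : Int) - 1).toNat []).getD m 0 + 1) = (k : Int) + m + 1 := by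
      by_cases h0 : k = 0
      · subst h0
        rw [hv rfl, if_pos (show ((0 : Nat) : Int) = 0 from by norm_num)]
        push_cast; ring
      · have hknz : ((k : Nat) : Int) ≠ 0 := by exact_mod_cast h0
        rw [if_neg hknz]
        have ht : (((k : Nat) : Int) - 1).toNat = k - 1 := by omega
        rw [ht, pvState_getD N M k m (k - 1) (by omega), if_pos (by omega),
          pvRowT_getD M (k - 1) m (by omega)]
        have : (((k - 1 : Nat)) : Int) = (k : Int) - 1 := by omega
        rw [this]; ring
    rw [hrow, hval, pvRowP_set M k m, pvState_set N M k m (m + 1)]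
    simp only [Prod.mk.injEq]
    exact ⟨trivial, by push_cast; ring⟩

-- the outer loop of the first pass, row by row
theorem pvOuter (N M : Nat) (k : Nat) (hk : k ≤ N) :
    (List.range k).foldl (fun st (i : Nat) =>
      (List.range M).foldl
        (fun (st : List (List Int) × Int) (j : Nat) =>
          (st.1.set i ((st.1.getD i []).set j
              (if ((i : Nat) : Int) = 0 then st.2 else (st.1.getD (((i : Nat) : Int) - 1).toNat []).getD j 0 + 1)),
           st.2 + 1)) st)
      (pvState N M 0 0, 1)
      = (pvState N M k 0, (1 + (k : Int) * M)) := by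
  induction k with
  | zero => simp
  | succ k ih =>
    have hk' : k ≤ N := Nat.le_of_succ_le hk
    rw [List.range_succ, List.foldl_append, ih hk', List.foldl_cons, List.foldl_nil]
    rw [pvInner N M k (by omega) (1 + (k : Int) * M) (by intro h; subst h; simp) M le_rfl]
    rw [pvState_roll N M k (by omega)]
    simp only [Prod.mk.injEq]
    exact ⟨trivial, by push_cast; ring⟩

theorem pvAlt_eq_target (rows cols : Int) :
    create_sorted_2d_array_alt rows cols = pvTargetT rows.toNat cols.toNat := by
  unfold create_sorted_2d_array_alt pvTargetT pvRowT
  rw [PySem.List.pyRange_one 0 rows, PySem.List.pyRange_one 0 cols]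
  simp [List.map_map, Function.comp]

-- second pass: every write puts back the value already there
theorem pvPhase2 (rows cols : Int) :
    (PySem.List.pyRange 1 rows 1).foldl (fun a i =>
      (PySem.List.pyRange 1 cols 1).foldl (fun a j =>
        a.set i.toNat ((a.getD i.toNat []).set j.toNat
          (max ((a.getD i.toNat []).getD j.toNat 0) ((a.getD i.toNat []).getD (j - 1).toNat 0 + 1)))) a)
      (pvTargetT rows.toNat cols.toNat) = pvTargetT rows.toNat cols.toNat := by
  set N := rows.toNat with hN
  set M := cols.toNat with hM
  apply pvFoldl_fix
  intro i hi
  rw [PySem.List.mem_pyRange_one] at hi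
  have hiN : i.toNat < N := by omega
  apply pvFoldl_fix
  intro j hj
  rw [PySem.List.mem_pyRange_one] at hj
  have hjM : j.toNat < M := by omega
  have hj1M : (j - 1).toNat < M := by omega
  have hrow : (pvTargetT N M).getD i.toNat [] = pvRowT M i.toNat := by
    simp only [pvTargetT]
    rw [PySem.List.getD_map_range _ _ _ _ hiN]
  rw [hrow, pvRowT_getD M _ _ hjM, pvRowT_getD M _ _ hj1M]
  have hmax : max ((i.toNat : Int) + j.toNat + 1) ((i.toNat : Int) + (j - 1).toNat + 1 + 1)
      = (i.toNat : Int) + j.toNat + 1 := by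
    have : ((j - 1).toNat : Int) = (j.toNat : Int) - 1 := by omega
    rw [this]; omega
  rw [hmax, ← pvRowT_getD M i.toNat j.toNat hjM,
    pvSet_getD_self _ _ _ (by rw [pvRowT_length]; exact hjM), ← hrow,
    pvSet_getD_self _ _ _ (by simp [pvTargetT]; exact hiN)]

-- ===== VERDICT (by name: the statement is the Claim_ definition above) =====
theorem create_sorted_2d_array_spec : Claim_equal_create_sorted_2d_array := by
  intro rows cols _
  unfold Spec_create_sorted_2d_array create_sorted_2d_array
  rw [pvAlt_eq_target]
  have hinit : (PySem.List.pyRange 0 rows 1).map (fun _ => (PySem.List.pyRange 0 cols 1).map (fun _ => (0 : Int)))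
      = pvState rows.toNat cols.toNat 0 0 := by
    rw [pvState_init, PySem.List.pyRange_one 0 rows, PySem.List.pyRange_one 0 cols]
    simp [List.map_map, Function.comp_def]
  rw [hinit, PySem.List.pyRange_one 0 rows, PySem.List.pyRange_one 0 cols]
  simp only [List.foldl_map, zero_add, Int.toNat_natCast, Int.sub_zero]
  rw [pvOuter rows.toNat cols.toNat rows.toNat le_rfl]
  exact pvState_final rows.toNat cols.toNat ▸ pvPhase2 rows cols
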